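-- pv_equiv track=rewrite | github.com/robertchase/txt2tufte | tufte.py | to_lines
-- ===== SOURCE A (Python) =====
-- def to_lines(data):
--     """break data into list of lines"""
--     result = []
--     for line in data.split("\n"):
--         if line := line.strip():
--             result.append(line)
--         elif result:  # ignore empty lines at top of file
--             if result[-1]:  # ignore duplicate empty lines
--                 result.append("")
--     return result
-- ===== SOURCE B (Python) =====
-- def to_lines(data):
--     """break data into list of lines"""
--     # pass 1: strip lines and group consecutive non-empty lines into paragraphs
--     lines = [line.strip() for line in data.split("\n")]
--     groups = []
--     cur = []
--     for line in lines:
--         if line: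
--             cur.append(line)
--         elif cur:
--             groups.append(cur)
--             cur = []
--     if cur:
--         groups.append(cur)
--         trailing = False
--     else:
--         trailing = bool(groups)
--     # pass 2: join paragraphs with single empty-line separators
--     out = []
--     for g in groups:
--         if out:
--             out.append("")
--         out.extend(g)
--     if trailing:
--         out.append("")
--     return out
-- ===== Notes on version B (the rewrite author's own statement) =====
-- stated objective: alternative
-- what changed: A makes one stateful pass appending lines while peeking at result[-1] to suppress duplicate/leading empties; B instead groups consecutive non-empty stripped lines into paragraphs in one pass and then joins the paragraphs with single empty-line separators (plus one trailing separator when the data ends with empty lines).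
import Mathlib
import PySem

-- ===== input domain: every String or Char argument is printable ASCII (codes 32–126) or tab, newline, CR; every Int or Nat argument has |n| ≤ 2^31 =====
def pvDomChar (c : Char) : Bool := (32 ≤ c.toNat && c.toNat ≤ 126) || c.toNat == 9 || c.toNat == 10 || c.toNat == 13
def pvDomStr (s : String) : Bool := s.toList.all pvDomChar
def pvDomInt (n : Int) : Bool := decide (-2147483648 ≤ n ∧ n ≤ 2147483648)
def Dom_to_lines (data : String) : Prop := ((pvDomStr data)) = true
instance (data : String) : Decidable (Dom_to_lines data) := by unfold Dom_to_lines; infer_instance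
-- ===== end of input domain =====

-- B replaces A's single stateful pass (peeking at result[-1]) by a two-pass decomposition:
-- first group consecutive non-empty stripped lines into paragraphs, then join the paragraphs
-- with single empty-line separators (objective: alternative decomposition, same cost).

-- ===== PORT A =====
-- one iteration of A's loop body (line := line.strip(); append / conditional "" append)
def toLinesStepA (result : List String) (line : String) : List String :=
  let line := PySem.Str.strip line
  if line ≠ "" then result ++ [line]
  else if result ≠ [] then
    match PySem.List.pyGet? result (-1) with
    | some last => if last ≠ "" then result ++ [""] else result
    | none => result   -- unreachable: result ≠ []
  else result

def to_lines (data : String) : List String :=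
  (((PySem.Str.split? data "\n").getD [])).foldl toLinesStepA []

-- ===== PORT B =====
-- pass 1 body: accumulate (groups, cur) over the stripped lines
def toLinesGroupStep (st : List (List String) × List String) (line : String) :
    List (List String) × List String :=
  if line ≠ "" then (st.1, st.2 ++ [line])
  else if st.2 ≠ [] then (st.1 ++ [st.2], [])
  else st

-- pass 2 body: 'if out: out.append(""); out.extend(g)'
def toLinesJoinStep (out : List String) (g : List String) : List String :=
  (if out ≠ [] then out ++ [""] else out) ++ g

def to_lines_alt (data : String) : List String :=
  let lines := (((PySem.Str.split? data "\n").getD [])).map PySem.Str.strip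
  let st := lines.foldl toLinesGroupStep ([], [])
  let gt : List (List String) × Bool :=
    if st.2 ≠ [] then (st.1 ++ [st.2], false) else (st.1, !st.1.isEmpty)
  let out := gt.1.foldl toLinesJoinStep []
  if gt.2 then out ++ [""] else out

-- ===== PRECONDITION & SPEC =====
def Spec_to_lines (data : String) (out : List String) : Prop := out = to_lines_alt data
instance (data : String) (out : List String) : Decidable (Spec_to_lines data out) := by unfold Spec_to_lines; infer_instance

-- ===== CLAIM (what is proved, stated in full; the proofs are below) =====
def Claim_equal_to_lines : Prop := ∀ (data : String), Dom_to_lines data → Spec_to_lines data (to_lines data)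

-- ===== LEMMAS AND PROOFS =====

-- B's finishing phase, as a function of pass-1's state
def renderTL (gs : List (List String)) (cur : List String) : List String :=
  let gt : List (List String) × Bool :=
    if cur ≠ [] then (gs ++ [cur], false) else (gs, !gs.isEmpty)
  let out := gt.1.foldl toLinesJoinStep []
  if gt.2 then out ++ [""] else out

lemma renderTL_of_cur (gs : List (List String)) (cur : List String) (hc : cur ≠ []) :
    renderTL gs cur = (gs ++ [cur]).foldl toLinesJoinStep [] := by
  simp [renderTL, hc]

lemma renderTL_nil (gs : List (List String)) :
    renderTL gs [] =
      if gs = [] then [] else gs.foldl toLinesJoinStep [] ++ [""] := by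
  by_cases h : gs = [] <;> simp [renderTL, h]

lemma joinStep_ne_nil (acc g : List String) (h : acc ≠ []) :
    toLinesJoinStep acc g ≠ [] := by
  simp [toLinesJoinStep, h]

lemma foldl_join_ne_nil (gs : List (List String)) (acc : List String) (h : acc ≠ []) :
    gs.foldl toLinesJoinStep acc ≠ [] := by
  induction gs generalizing acc with
  | nil => simpa using h
  | cons g gs ih => exact ih _ (joinStep_ne_nil acc g h)

lemma foldl_join_nil_eq_nil_iff (gs : List (List String)) (hg : ∀ g ∈ gs, g ≠ []) :
    gs.foldl toLinesJoinStep [] = [] ↔ gs = [] := by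
  cases gs with
  | nil => simp
  | cons g gs =>
    have hgne : g ≠ [] := hg g (by simp)
    have h1 : (g :: gs).foldl toLinesJoinStep [] = gs.foldl toLinesJoinStep g := by
      simp [List.foldl_cons, toLinesJoinStep]
    rw [h1]
    simp [foldl_join_ne_nil gs g hgne]

lemma foldl_join_append_singleton (gs : List (List String)) (c : List String) :
    (gs ++ [c]).foldl toLinesJoinStep [] =
      toLinesJoinStep (gs.foldl toLinesJoinStep []) c := by
  simp [List.foldl_append]

-- last element of render when cur ≠ [] is cur's last
lemma render_getLast_of_cur (gs : List (List String)) (cur : List String) (hc : cur ≠ []) :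
    (renderTL gs cur).getLast? = cur.getLast? := by
  rw [renderTL_of_cur gs cur hc, foldl_join_append_singleton]
  simp only [toLinesJoinStep]
  rw [List.getLast?_append_of_ne_nil _ hc]

lemma render_ne_nil_of_cur (gs : List (List String)) (cur : List String) (hc : cur ≠ []) :
    renderTL gs cur ≠ [] := by
  rw [renderTL_of_cur gs cur hc, foldl_join_append_singleton]
  simp [toLinesJoinStep, hc]

-- B's trailing separator: pushing the open paragraph then ending equals appending one ""
lemma render_push (gs : List (List String)) (cur : List String) (hc : cur ≠ []) :
    renderTL (gs ++ [cur]) [] = renderTL gs cur ++ [""] := by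
  rw [renderTL_nil, renderTL_of_cur gs cur hc]
  simp

-- appending a non-empty line extends the open paragraph
lemma render_extend (gs : List (List String)) (cur : List String) (l : String)
    (hgs : ∀ g ∈ gs, g ≠ []) :
    renderTL gs (cur ++ [l]) = renderTL gs cur ++ [l] := by
  have hc2 : cur ++ [l] ≠ [] := by simp
  rw [renderTL_of_cur gs _ hc2, foldl_join_append_singleton]
  by_cases hc : cur = []
  · subst hc
    rw [renderTL_nil]
    by_cases hgs0 : gs = []
    · subst hgs0; simp [toLinesJoinStep]
    · have hJ : gs.foldl toLinesJoinStep [] ≠ [] := by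
        rw [ne_eq, foldl_join_nil_eq_nil_iff gs hgs]; exact hgs0
      simp [toLinesJoinStep, hJ, hgs0]
  · rw [renderTL_of_cur gs cur hc, foldl_join_append_singleton]
    simp [toLinesJoinStep, List.append_assoc]

-- the key invariant: running A's loop from render gs cur over any remaining lines
-- produces render of B's pass-1 result
lemma to_lines_inv (lines : List String) :
    ∀ (gs : List (List String)) (cur : List String),
      (∀ s ∈ cur, s ≠ "") → (∀ g ∈ gs, g ≠ []) →
      lines.foldl toLinesStepA (renderTL gs cur)
        = (fun st => renderTL st.1 st.2)
            ((lines.map PySem.Str.strip).foldl toLinesGroupStep (gs, cur)) := by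
  induction lines with
  | nil => intro gs cur _ _; rfl
  | cons l lines ih =>
    intro gs cur hcur hgs
    simp only [List.foldl_cons, List.map_cons]
    by_cases hl : PySem.Str.strip l = ""
    · by_cases hc : cur = []
      · -- empty stripped line, no open paragraph: both states unchanged
        have hA : toLinesStepA (renderTL gs cur) l = renderTL gs cur := by
          subst hc
          rw [renderTL_nil]
          by_cases hgs0 : gs = []
          · simp [toLinesStepA, hl, hgs0]
          · have hne : gs.foldl toLinesJoinStep [] ++ [""] ≠ [] := by simp
            simp [toLinesStepA, hl, hgs0, hne, PySem.List.pyGet?_neg_one]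
        have hB : toLinesGroupStep (gs, cur) (PySem.Str.strip l) = (gs, cur) := by
          simp [toLinesGroupStep, hl, hc]
        rw [hA, hB]
        exact ih gs cur hcur hgs
      · -- empty stripped line closes the open paragraph; A appends one ""
        have hlast : (renderTL gs cur).getLast? = cur.getLast? :=
          render_getLast_of_cur gs cur hc
        obtain ⟨x, hx⟩ : ∃ x, cur.getLast? = some x := by
          cases h : cur.getLast? with
          | none => exact absurd (List.getLast?_eq_none_iff.mp h) hc
          | some x => exact ⟨x, rfl⟩
        have hxne : x ≠ "" := hcur x (List.mem_of_getLast? hx)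
        have hrne : renderTL gs cur ≠ [] := render_ne_nil_of_cur gs cur hc
        have hA : toLinesStepA (renderTL gs cur) l = renderTL gs cur ++ [""] := by
          simp [toLinesStepA, hl, hrne, PySem.List.pyGet?_neg_one, hlast, hx, hxne]
        have hB : toLinesGroupStep (gs, cur) (PySem.Str.strip l) = (gs ++ [cur], []) := by
          simp [toLinesGroupStep, hl, hc]
        rw [hA, hB, ← render_push gs cur hc]
        exact ih (gs ++ [cur]) []
          (by intro s hs; simp at hs)
          (by intro g hg; rcases List.mem_append.mp hg with h | h
              · exact hgs g h
              · simp at h; subst h; exact hc)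
    · -- non-empty stripped line: appended to the open paragraph on both sides
      have hA : toLinesStepA (renderTL gs cur) l = renderTL gs cur ++ [PySem.Str.strip l] := by
        simp [toLinesStepA, hl]
      have hB : toLinesGroupStep (gs, cur) (PySem.Str.strip l)
          = (gs, cur ++ [PySem.Str.strip l]) := by
        simp [toLinesGroupStep, hl]
      rw [hA, hB, ← render_extend gs cur (PySem.Str.strip l) hgs]
      exact ih gs (cur ++ [PySem.Str.strip l])
        (by intro s hs; rcases List.mem_append.mp hs with h | h
            · exact hcur s h
            · simp at h; subst h; exact hl)
        hgs

-- ===== VERDICT (by name: the statement is the Claim_ definition above) =====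
theorem to_lines_spec : Claim_equal_to_lines := by
  intro data _
  unfold Spec_to_lines
  have h := to_lines_inv ((PySem.Str.split? data "\n").getD []) [] [] (by simp) (by simp)
  have h0 : renderTL [] [] = [] := rfl
  rw [h0] at h
  exact h
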